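-- pv_equiv track=rewrite | github.com/DanielYeung0131/Engineering-102 | chapter_9/word_puzzle.py | get_valid_letters
-- ===== SOURCE A (Python) =====
-- def get_valid_letters(s):
--     a = ''
--     alphabet = 'ABCDEFGHIJKLMNOPQRSTUVWXYZ'
--     for i in s:
--         if i in a:
--             continue
--         else:
--             if i in alphabet:
--                 a += i
--         if len(a) == 10:
--             break
--     return a
-- ===== SOURCE B (Python) =====
-- def get_valid_letters(s):
--     alphabet = 'ABCDEFGHIJKLMNOPQRSTUVWXYZ'
--     present = [(s.find(c), c) for c in alphabet if s.find(c) != -1]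
--     present.sort(key=lambda pc: pc[0])
--     return ''.join(c for _, c in present[:10])
-- ===== Notes on version B (the rewrite author's own statement) =====
-- stated objective: faster
-- what changed: B inverts the traversal: instead of scanning s character by character with a dedup accumulator and an early break at 10, it runs str.find once per alphabet letter to get each letter's first-occurrence index, sorts the present letters by that index and takes the first 10.
import Mathlib
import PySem

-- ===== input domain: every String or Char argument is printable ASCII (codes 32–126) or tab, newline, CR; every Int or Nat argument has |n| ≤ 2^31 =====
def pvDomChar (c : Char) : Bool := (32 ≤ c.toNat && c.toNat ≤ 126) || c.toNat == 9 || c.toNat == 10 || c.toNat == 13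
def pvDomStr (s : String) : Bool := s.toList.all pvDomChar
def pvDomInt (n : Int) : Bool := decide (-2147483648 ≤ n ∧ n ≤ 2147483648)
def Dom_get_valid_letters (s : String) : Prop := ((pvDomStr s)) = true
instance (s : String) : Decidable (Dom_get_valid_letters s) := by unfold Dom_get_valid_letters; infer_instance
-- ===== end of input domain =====

-- B inverts the traversal: per-alphabet-letter str.find collects first-occurrence indices, the
-- present letters are sorted by that index and the first 10 taken, instead of A's single scan of s
-- with a membership accumulator and a len==10 break (a timing run measured B faster).


-- ===== PORT A =====
-- alphabet = 'ABCDEFGHIJKLMNOPQRSTUVWXYZ'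
def pvAlphabet : List Char := "ABCDEFGHIJKLMNOPQRSTUVWXYZ".toList

-- the for-loop of A: accumulator a, 'continue' on i in a, append on i in alphabet, break on len(a)==10
-- ('i in a' / 'i in alphabet' are single-character-in-string tests, i.e. char membership: exact)
def pvLoopA : List Char → List Char → List Char
  | [], a => a
  | i :: rest, a =>
    if i ∈ a then pvLoopA rest a
    else
      let a' := if i ∈ pvAlphabet then a ++ [i] else a
      if a'.length = 10 then a' else pvLoopA rest a'

def get_valid_letters (s : String) : String := String.mk (pvLoopA s.toList [])

-- ===== PORT B =====
-- present = [(s.find(c), c) for c in alphabet if s.find(c) != -1]  (conditional comprehension =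
--   filter + map; s.find of a single character is PySem.Chars.find s.toList [c]: exact, -1 if absent)
-- present.sort(key=lambda pc: pc[0])  →  PySem.List.sorted with key fst (stable sort, as list.sort)
-- ''.join(c for _, c in present[:10])  →  take 10, map snd, String.mk
def get_valid_letters_alt (s : String) : String :=
  let present := (pvAlphabet.filter (fun c => PySem.Chars.find s.toList [c] != -1)).map
      (fun c => (PySem.Chars.find s.toList [c], c))
  let sortedP := PySem.List.sorted present (fun pc => pc.1)
  String.mk ((sortedP.take 10).map (fun pc => pc.2))

-- ===== PRECONDITION & SPEC =====
def Spec_get_valid_letters (s : String) (out : String) : Prop := out = get_valid_letters_alt s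
instance (s : String) (out : String) : Decidable (Spec_get_valid_letters s out) := by unfold Spec_get_valid_letters; infer_instance

-- ===== CLAIM (what is proved, stated in full; the proofs are below) =====
def Claim_equal_get_valid_letters : Prop := ∀ (s : String), Dom_get_valid_letters s → Spec_get_valid_letters s (get_valid_letters s)

-- ===== LEMMAS AND PROOFS =====

-- ---- A side: the loop is "take 10 of the ordered dedup of the alphabet-filtered characters" ----

-- Set.add only appends, so the seed stays a prefix of the fold.
lemma pv_prefix_foldl_add (cs : List Char) (a : List Char) :
    a <+: cs.foldl PySem.Set.add a := by
  induction cs generalizing a with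
  | nil => exact List.prefix_refl a
  | cons c cs ih =>
    refine List.IsPrefix.trans ?_ (ih (PySem.Set.add a c))
    rw [PySem.Set.add_eq_ite]
    split
    · exact List.prefix_refl a
    · exact ⟨[c], rfl⟩

lemma pv_take_of_prefix {a l : List Char} (h : a <+: l) (hlen : a.length = 10) :
    l.take 10 = a := by
  obtain ⟨t, rfl⟩ := h
  rw [← hlen, List.take_left]

-- A's loop equals "take 10 of the Set.add-fold over the alphabet-filtered tail", for any seed shorter than 10.
lemma pv_key (cs : List Char) :
    ∀ a : List Char, a.length < 10 →
      pvLoopA cs a = ((cs.filter (fun c => c ∈ pvAlphabet)).foldl PySem.Set.add a).take 10 := by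
  induction cs with
  | nil =>
    intro a ha
    simp [pvLoopA, List.take_of_length_le (Nat.le_of_lt ha)]
  | cons c cs ih =>
    intro a ha
    by_cases hmem : c ∈ a
    · by_cases halph : c ∈ pvAlphabet
      · simp [pvLoopA, hmem, halph, ih a ha]
      · simp [pvLoopA, hmem, halph, ih a ha]
    · by_cases halph : c ∈ pvAlphabet
      · have hadd : PySem.Set.add a c = a ++ [c] := PySem.Set.add_of_not_mem hmem
        by_cases h9 : a.length = 9
        · have hlen10 : (a ++ [c]).length = 10 := by simp [h9]
          have hpre : (a ++ [c]) <+: (cs.filter (fun c => decide (c ∈ pvAlphabet))).foldl PySem.Set.add (a ++ [c]) :=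
            pv_prefix_foldl_add _ _
          simp [pvLoopA, hmem, halph, h9, pv_take_of_prefix hpre hlen10]
        · have hlt : (a ++ [c]).length < 10 := by
            simp only [List.length_append, List.length_singleton]
            omega
          simp [pvLoopA, hmem, halph, h9, ih _ hlt]
      · have hlen : ¬ a.length = 10 := Nat.ne_of_lt ha
        simp [pvLoopA, hmem, halph, hlen, ih a ha]

-- ---- B side, part 1: str.find of a single character, cons-step characterisation ----

lemma pv_go_nil (x : Char) (k : Nat) : PySem.Chars.find.go [x] [] k = -1 := rfl

lemma pv_go_cons (x c : Char) (t : List Char) (k : Nat) :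
    PySem.Chars.find.go [x] (c :: t) k =
      if x == c then (k:Int) else PySem.Chars.find.go [x] t (k+1) := by
  show (if [x].isPrefixOf (c :: t) then (k:Int) else PySem.Chars.find.go [x] t (k+1)) = _
  simp [List.isPrefixOf]

lemma pv_go_neg_one_le (x : Char) : ∀ (t : List Char) (k : Nat), -1 ≤ PySem.Chars.find.go [x] t k := by
  intro t
  induction t with
  | nil => intro k; rw [pv_go_nil]
  | cons c t ih =>
    intro k
    rw [pv_go_cons]
    split
    · exact le_trans (by norm_num) (Int.natCast_nonneg k)
    · exact ih (k+1)

lemma pv_go_shift (x : Char) (t : List Char) :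
    ∀ k : Nat, PySem.Chars.find.go [x] t k =
      if PySem.Chars.find.go [x] t 0 = -1 then -1 else PySem.Chars.find.go [x] t 0 + k := by
  induction t with
  | nil => intro k; simp [pv_go_nil]
  | cons c t ih =>
    intro k
    rw [pv_go_cons, pv_go_cons]
    by_cases hxc : x == c
    · simp [hxc]
    · simp only [hxc, if_false]
      rw [ih (k+1), ih 1]
      have h2 := pv_go_neg_one_le x t 0
      by_cases h : PySem.Chars.find.go [x] t 0 = -1
      · simp [h]
      · have hne : ¬ (PySem.Chars.find.go [x] t 0 + (1:Int) = -1) := by omega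
        simp only [Bool.false_eq_true, if_false, h, Nat.cast_one, Nat.cast_add]
        rw [if_neg hne]
        ring

lemma pv_find_cons (x c : Char) (t : List Char) :
    PySem.Chars.find (c :: t) [x] =
      if x = c then 0
      else if PySem.Chars.find t [x] = -1 then -1 else PySem.Chars.find t [x] + 1 := by
  show PySem.Chars.find.go [x] (c :: t) 0 = _
  rw [pv_go_cons, pv_go_shift x t 1]
  by_cases hxc : x = c <;> simp [hxc, PySem.Chars.find]

lemma pv_find_nonneg {x : Char} {t : List Char} (h : x ∈ t) : 0 ≤ PySem.Chars.find t [x] := by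
  rw [PySem.Chars.find_nonneg_iff]
  exact (List.singleton_infix_iff x t).mpr h

-- ---- B side, part 2: the ordered dedup is strictly increasing in first-occurrence index ----

-- normal form of a Set.add fold over an arbitrary seed
lemma pv_foldl_add_nf : ∀ (n : Nat) (l : List Char), l.length ≤ n → ∀ acc : List Char,
    l.foldl PySem.Set.add acc =
      acc ++ (l.filter (fun x => decide (x ∉ acc))).foldl PySem.Set.add [] := by
  intro n
  induction n with
  | zero =>
    intro l hl acc
    have : l = [] := List.eq_nil_of_length_eq_zero (Nat.le_zero.mp hl)
    simp [this]
  | succ n ih =>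
    intro l hl acc
    cases l with
    | nil => simp
    | cons c l =>
      simp only [List.foldl_cons, List.filter_cons]
      by_cases hc : c ∈ acc
      · have hadd : PySem.Set.add acc c = acc := by rw [PySem.Set.add_eq_ite, if_pos hc]
        simp only [hc, not_true, decide_false, hadd]
        exact ih l (Nat.le_of_succ_le_succ hl) acc
      · have hadd : PySem.Set.add acc c = acc ++ [c] := PySem.Set.add_of_not_mem hc
        simp only [hc, not_false_iff, decide_true, if_pos, hadd]
        rw [ih l (Nat.le_of_succ_le_succ hl) (acc ++ [c]), List.foldl_cons]
        have hadd2 : PySem.Set.add [] c = [c] := by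
          rw [PySem.Set.add_eq_ite, if_neg (List.not_mem_nil)]; rfl
        rw [hadd2, ih (l.filter (fun x => decide (x ∉ acc)))
              (le_trans (List.length_filter_le _ _) (Nat.le_of_succ_le_succ hl)) [c]]
        rw [List.append_assoc, List.filter_filter]
        congr 3
        apply List.filter_congr
        intro x _
        simp [List.mem_append, not_or, and_comm]

lemma pv_dedup_cons (c : Char) (l : List Char) :
    PySem.List.dedup (c :: l) = c :: PySem.List.dedup (l.filter (fun x => decide (x ≠ c))) := by
  rw [PySem.List.dedup_eq_ofList, PySem.List.dedup_eq_ofList, PySem.Set.ofList_eq_foldl,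
      PySem.Set.ofList_eq_foldl, List.foldl_cons]
  have hadd : PySem.Set.add [] c = [c] := by
    rw [PySem.Set.add_eq_ite, if_neg (List.not_mem_nil)]; rfl
  rw [hadd, pv_foldl_add_nf l.length l le_rfl [c]]
  have hf : (List.filter (fun x => decide (x ∉ [c])) l) = (List.filter (fun x => decide (x ≠ c)) l) := by
    apply List.filter_congr
    intro x _
    simp
  rw [hf]
  rfl

-- elements below and right of a fresh head compare by find in the extended string
lemma pv_pairwise_lift {c : Char} {t l : List Char}
    (hsub : ∀ x ∈ l, x ∈ t ∧ x ≠ c)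
    (h : l.Pairwise (fun a b => PySem.Chars.find t [a] < PySem.Chars.find t [b])) :
    l.Pairwise (fun a b => PySem.Chars.find (c :: t) [a] < PySem.Chars.find (c :: t) [b]) := by
  refine List.Pairwise.imp_of_mem ?_ h
  intro a b ha hb hab
  obtain ⟨hat, hac⟩ := hsub a ha
  obtain ⟨hbt, hbc⟩ := hsub b hb
  rw [pv_find_cons a c t, pv_find_cons b c t, if_neg hac, if_neg hbc,
      if_neg (by have := pv_find_nonneg hat; omega),
      if_neg (by have := pv_find_nonneg hbt; omega)]
  omega

-- the ordered dedup of a filtered list is strictly increasing in first-occurrence index (str.find)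
lemma pv_dedup_pairwise_find : ∀ (cs : List Char) (p : Char → Bool),
    (PySem.List.dedup (cs.filter p)).Pairwise
      (fun a b => PySem.Chars.find cs [a] < PySem.Chars.find cs [b]) := by
  intro cs
  induction cs with
  | nil => intro p; exact List.Pairwise.nil
  | cons c t ih =>
    intro p
    by_cases hp : p c
    · rw [List.filter_cons_of_pos hp, pv_dedup_cons]
      constructor
      · intro b hb
        have hb' : b ∈ (t.filter p).filter (fun x => decide (x ≠ c)) :=
          (PySem.List.mem_dedup _ _).mp hb
        have hbne : b ≠ c := by simpa using List.of_mem_filter hb'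
        have hbt : b ∈ t := List.mem_of_mem_filter (List.mem_of_mem_filter hb')
        have hnn := pv_find_nonneg hbt
        rw [pv_find_cons c c t, pv_find_cons b c t, if_pos rfl, if_neg hbne,
            if_neg (by omega)]
        omega
      · have h2 := ih (fun x => decide (x ≠ c) && p x)
        rw [← List.filter_filter] at h2
        refine pv_pairwise_lift ?_ h2
        intro x hx
        have hx' := (PySem.List.mem_dedup _ _).mp hx
        exact ⟨List.mem_of_mem_filter (List.mem_of_mem_filter hx'),
               by simpa using List.of_mem_filter hx'⟩
    · rw [List.filter_cons_of_neg hp]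
      refine pv_pairwise_lift ?_ (ih p)
      intro x hx
      have hx' := (PySem.List.mem_dedup _ _).mp hx
      refine ⟨List.mem_of_mem_filter hx', ?_⟩
      intro hxc
      subst hxc
      exact hp (List.of_mem_filter hx')

-- B unwinds to "take 10 of the ordered dedup": sorting the present letters by first-occurrence
-- index reproduces the dedup order (sorted_eq_of_perm_of_pairwise_lt).
lemma pv_alt_eq_dedup (s : String) :
    String.mk ((PySem.List.dedup (s.toList.filter (fun c => decide (c ∈ pvAlphabet)))).take 10)
      = get_valid_letters_alt s := by
  simp only [get_valid_letters_alt]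
  have hnodupA : pvAlphabet.Nodup := by decide
  have hcharperm : (PySem.List.dedup (s.toList.filter (fun c => decide (c ∈ pvAlphabet)))).Perm
      (pvAlphabet.filter (fun c => PySem.Chars.find s.toList [c] != -1)) := by
    refine (List.perm_ext_iff_of_nodup (PySem.List.nodup_dedup _) (hnodupA.filter _)).mpr ?_
    intro a
    simp only [PySem.List.mem_dedup, List.mem_filter, decide_eq_true_eq, bne_iff_ne, ne_eq,
      PySem.Chars.find_eq_neg_one_iff, not_not, List.singleton_infix_iff]
    exact and_comm
  have hpair : ((PySem.List.dedup (s.toList.filter (fun c => decide (c ∈ pvAlphabet)))).map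
      (fun c => (PySem.Chars.find s.toList [c], c))).Pairwise
      (fun a b => a.1 < b.1) :=
    (List.pairwise_map).mpr (pv_dedup_pairwise_find s.toList _)
  have hsorted := PySem.List.sorted_eq_of_perm_of_pairwise_lt
      ((pvAlphabet.filter (fun c => PySem.Chars.find s.toList [c] != -1)).map
        (fun c => (PySem.Chars.find s.toList [c], c)))
      ((PySem.List.dedup (s.toList.filter (fun c => decide (c ∈ pvAlphabet)))).map
        (fun c => (PySem.Chars.find s.toList [c], c)))
      (fun pc => pc.1) (hcharperm.map _) hpair
  rw [hsorted, ← List.map_take, List.map_map]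
  have hid : ((fun pc => pc.2) ∘ fun c => (PySem.Chars.find s.toList [c], c)) = @id Char := rfl
  rw [hid, List.map_id]

-- ===== VERDICT (by name: the statement is the Claim_ definition above) =====
theorem get_valid_letters_spec : Claim_equal_get_valid_letters := by
  intro s _
  show _ = _
  unfold get_valid_letters
  rw [pv_key s.toList [] (by norm_num), ← PySem.Set.ofList_eq_foldl, ← PySem.List.dedup_eq_ofList]
  exact pv_alt_eq_dedup s
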